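-- pv_equiv track=rewrite | github.com/JwahoonKim/PS | LeetCode/Python/1569_Number of Ways to Reorder Array to Get Same BST.py | helper
-- ===== SOURCE A (Python) =====
-- import math
--
-- def comb(n, k):
--     return math.factorial(n) // (math.factorial(k) * math.factorial(n - k))
--
-- def helper(nums):
--     if not nums:
--         return 1
--
--     root = nums[0]
--     left_arr = [n for n in nums if n < root]
--     right_arr = [n for n in nums if n > root]
--     len_left = len(left_arr)
--     len_right = len(right_arr)
--     return helper(left_arr) * helper(right_arr) * comb(len_left + len_right, len_left)
-- ===== SOURCE B (Python) =====
-- import math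
--
-- def comb(n, k):
--     return math.factorial(n) // (math.factorial(k) * math.factorial(n - k))
--
-- class _Node:
--     __slots__ = ("val", "cnt", "left", "right")
--     def __init__(self, val):
--         self.val = val
--         self.cnt = 1  # number of inserted values equal to val
--         self.left = None
--         self.right = None
--
-- def _insert(root, x):
--     if root is None:
--         return _Node(x)
--     cur = root
--     while True:
--         if x < cur.val:
--             if cur.left is None:
--                 cur.left = _Node(x)
--                 return root
--             cur = cur.left
--         elif x > cur.val:
--             if cur.right is None:
--                 cur.right = _Node(x)
--                 return root
--             cur = cur.right
--         else:
--             cur.cnt += 1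
--             return root
--
-- def _post(t):
--     # returns (total inserted values in subtree, ways)
--     if t is None:
--         return (0, 1)
--     ls, lw = _post(t.left)
--     rs, rw = _post(t.right)
--     return (ls + rs + t.cnt, lw * rw * comb(ls + rs, ls))
--
-- def helper(nums):
--     root = None
--     for x in nums:
--         root = _insert(root, x)
--     return _post(root)[1]
-- ===== Notes on version B (the rewrite author's own statement) =====
-- stated objective: alternative
-- what changed: Instead of recursively partitioning the list with strict-comparison filters at every level, B builds an explicit BST once by iterative insertion (a per-node count absorbs equal values) and computes the answer in a single post-order pass using subtree totals.
import Mathlib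
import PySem

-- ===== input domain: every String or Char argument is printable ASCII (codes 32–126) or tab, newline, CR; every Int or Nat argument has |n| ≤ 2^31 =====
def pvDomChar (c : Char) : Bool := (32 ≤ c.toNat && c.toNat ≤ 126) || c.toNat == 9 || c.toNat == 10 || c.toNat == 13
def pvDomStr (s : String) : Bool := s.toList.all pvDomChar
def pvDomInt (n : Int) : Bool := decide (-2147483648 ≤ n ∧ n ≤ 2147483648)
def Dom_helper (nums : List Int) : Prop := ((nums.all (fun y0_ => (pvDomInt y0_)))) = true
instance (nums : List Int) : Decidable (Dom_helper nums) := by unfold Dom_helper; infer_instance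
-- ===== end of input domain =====

-- B builds an explicit BST with a per-node duplicate count in one pass and computes the answer in
-- one post-order traversal, instead of A's recursive strict-filter partitioning of the list
-- (alternative decomposition, same cost; return value only — B mutates no argument, like A).


-- ===== PORT A =====
-- math.factorial; exact for n ≥ 0 (the only call sites here pass nonnegative lengths)
def pyFactorial (n : Int) : Int := (Nat.factorial n.toNat : Int)

def comb (n k : Int) : Int :=
  PySem.Int.floordiv (pyFactorial n) (pyFactorial k * pyFactorial (n - k))

def helper : List Int → Int
  | [] => 1
  | root :: t =>
    let left_arr := (root :: t).filter (fun n => decide (n < root))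
    let right_arr := (root :: t).filter (fun n => decide (root < n))
    helper left_arr * helper right_arr *
      comb ((left_arr.length : Int) + (right_arr.length : Int)) (left_arr.length : Int)
termination_by nums => nums.length
decreasing_by
  · simpa [left_arr, List.filter_cons] using
      Nat.lt_succ_of_le (List.length_filter_le (fun n => decide (n < root)) t)
  · simpa [right_arr, List.filter_cons] using
      Nat.lt_succ_of_le (List.length_filter_le (fun n => decide (root < n)) t)

-- ===== PORT B =====
-- node value cnt left right; cnt = number of inserted values equal to value
inductive PvTree where
  | leaf : PvTree
  | node : Int → Int → PvTree → PvTree → PvTree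
deriving DecidableEq, Repr

def pvInsert : PvTree → Int → PvTree
  | .leaf, x => .node x 1 .leaf .leaf
  | .node v c l r, x =>
    if x < v then .node v c (pvInsert l x) r
    else if v < x then .node v c l (pvInsert r x)
    else .node v (c + 1) l r

-- returns (total number of inserted values in the subtree, ways)
def pvPost : PvTree → Int × Int
  | .leaf => (0, 1)
  | .node _ c l r =>
    let (ls, lw) := pvPost l
    let (rs, rw) := pvPost r
    (ls + rs + c, lw * rw * comb (ls + rs) ls)

def helper_alt (nums : List Int) : Int :=
  (pvPost (nums.foldl pvInsert .leaf)).2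

-- ===== PRECONDITION & SPEC =====
def Spec_helper (nums : List Int) (out : Int) : Prop := out = helper_alt nums
instance (nums : List Int) (out : Int) : Decidable (Spec_helper nums out) := by unfold Spec_helper; infer_instance

-- ===== CLAIM (what is proved, stated in full; the proofs are below) =====
def Claim_equal_helper : Prop := ∀ (nums : List Int), Dom_helper nums → Spec_helper nums (helper nums)

-- ===== LEMMAS AND PROOFS =====

-- Folding insertions into a node distributes over the strict-comparison filters,
-- equal values only bumping the node's count.
lemma fold_insert_node (xs : List Int) (v c : Int) (l r : PvTree) :
    xs.foldl pvInsert (.node v c l r) =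
      .node v (c + (xs.countP (fun n => decide (n = v)) : Int))
              ((xs.filter (fun n => decide (n < v))).foldl pvInsert l)
              ((xs.filter (fun n => decide (v < n))).foldl pvInsert r) := by
  induction xs generalizing c l r with
  | nil => simp
  | cons x xs ih =>
    rw [List.foldl_cons]
    by_cases h1 : x < v
    · have h2 : ¬ v < x := by omega
      have h3 : ¬ x = v := by omega
      rw [show pvInsert (PvTree.node v c l r) x = PvTree.node v c (pvInsert l x) r by
            simp [pvInsert, h1]]
      rw [ih]
      simp only [List.filter_cons, List.countP_cons]
      simp [h1, h2, h3]
    · by_cases h2 : v < x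
      · have h3 : ¬ x = v := by omega
        rw [show pvInsert (PvTree.node v c l r) x = PvTree.node v c l (pvInsert r x) by
              simp [pvInsert, h1, h2]]
        rw [ih]
        simp only [List.filter_cons, List.countP_cons]
        simp [h1, h2, h3]
      · have h3 : x = v := by omega
        rw [show pvInsert (PvTree.node v c l r) x = PvTree.node v (c + 1) l r by
              simp [pvInsert, h1, h2]]
        rw [ih]
        simp only [List.filter_cons, List.countP_cons]
        simp [h3]
        ring
-- Three-way partition of a list by comparison with root.
lemma filter_length_partition (t : List Int) (root : Int) :
    (t.filter (fun n => decide (n < root))).length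
      + (t.filter (fun n => decide (root < n))).length
      + t.countP (fun n => decide (n = root)) = t.length := by
  induction t with
  | nil => simp
  | cons x xs ih =>
    simp only [List.filter_cons, List.countP_cons]
    by_cases h1 : x < root
    · have h2 : ¬ root < x := by omega
      have h3 : ¬ x = root := by omega
      simp [h1, h2, h3]; omega
    · by_cases h2 : root < x
      · have h3 : ¬ x = root := by omega
        simp [h1, h2, h3]; omega
      · have h3 : x = root := by omega
        simp [h3]; omega

-- Main invariant: B's post-order pass returns (number of inserted values, A's value).
lemma pv_main : ∀ (n : Nat) (nums : List Int), nums.length ≤ n →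
    pvPost (nums.foldl pvInsert .leaf) = ((nums.length : Int), helper nums) := by
  intro n
  induction n with
  | zero =>
    intro nums hlen
    have : nums = [] := List.eq_nil_of_length_eq_zero (Nat.le_zero.mp hlen)
    subst this; simp [helper, pvPost]
  | succ n ih =>
    intro nums hlen
    cases nums with
    | nil => simp [helper, pvPost]
    | cons root t =>
      set la := t.filter (fun n => decide (n < root)) with hla
      set ra := t.filter (fun n => decide (root < n)) with hra
      have hlen' : t.length ≤ n := by simpa using hlen
      have ihl := ih la (le_trans (List.length_filter_le _ t) hlen')
      have ihr := ih ra (le_trans (List.length_filter_le _ t) hlen')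
      have hpart := filter_length_partition t root
      have hfold : (root :: t).foldl pvInsert .leaf =
          .node root (1 + (t.countP (fun n => decide (n = root)) : Int))
                     (la.foldl pvInsert .leaf) (ra.foldl pvInsert .leaf) := by
        simpa [List.foldl, pvInsert, hla, hra] using fold_insert_node t root 1 .leaf .leaf
      have hA : helper (root :: t) =
          helper la * helper ra * comb ((la.length : Int) + (ra.length : Int)) (la.length : Int) := by
        rw [helper]
        simp [hla, hra]
      rw [hfold, hA]
      simp only [pvPost, ihl, ihr]
      simp only [Prod.mk.injEq]
      refine ⟨?_, trivial⟩
      simp only [hla, hra, List.length_cons] at hpart ⊢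
      push_cast
      omega

-- ===== VERDICT (by name: the statement is the Claim_ definition above) =====
theorem helper_spec : Claim_equal_helper := by
  intro nums _
  unfold Spec_helper helper_alt
  rw [pv_main nums.length nums (Nat.le_refl _)]
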